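-- pv_equiv track=rewrite | github.com/hiunshim/olympiad | kick_start/kickstart_round_A_2022/hiun/challenge_nine.py | solve
-- ===== SOURCE A (Python) =====
-- def solve(digits):
--     L = len(digits)
--     num = 0
--     for digit in digits:
--         num += int(digit)
--     d = 9 - (num % 9)
--     if d == 9:
--         return digits[0:1] + '0' + digits[1:]
--     i = 0
--     while i < L and d >= int(digits[i]):
--         i += 1
--     return digits[:i] + str(d) + digits[i:]
-- ===== SOURCE B (Python) =====
-- def solve(digits):
--     num = sum(int(c) for c in digits)
--     e = (9 - num % 9) % 9
--     if e == 0: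
--         return digits[0:1] + '0' + digits[1:]
--     return min(digits[:i] + str(e) + digits[i:] for i in range(len(digits) + 1))
-- ===== Notes on version B (the rewrite author's own statement) =====
-- stated objective: alternative
-- what changed: A scans greedily for the leftmost position whose digit exceeds the insert digit; B computes the insert digit in closed form as (9 - num % 9) % 9 and takes the lexicographic minimum over all L+1 insertion positions.
import Mathlib
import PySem

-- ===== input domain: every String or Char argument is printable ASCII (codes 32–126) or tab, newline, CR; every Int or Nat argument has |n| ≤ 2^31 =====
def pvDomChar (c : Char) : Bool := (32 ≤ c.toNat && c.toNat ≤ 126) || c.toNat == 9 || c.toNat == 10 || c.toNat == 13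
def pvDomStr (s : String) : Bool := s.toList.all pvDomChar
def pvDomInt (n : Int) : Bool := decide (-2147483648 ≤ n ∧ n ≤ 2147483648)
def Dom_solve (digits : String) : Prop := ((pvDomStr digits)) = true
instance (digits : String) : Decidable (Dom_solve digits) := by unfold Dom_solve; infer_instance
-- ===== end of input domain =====

-- B replaces A's greedy leftmost-insertion-position scan by a closed-form insert digit
-- e = (9 - num % 9) % 9 and a brute-force minimum over all L+1 insertion positions (objective: alternative).

-- ===== PORT A =====
-- int(digit) for a one-character string; the .getD 0 is unreachable under Pre_solve (all chars are digits)
def pvDigitVal (c : Char) : Int := (PySem.Int.ofChars? [c]).getD 0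

-- the while loop 'i = 0; while i < L and d >= int(digits[i]): i += 1'
def pvIdxA (d : Int) : List Char → Nat
  | [] => 0
  | c :: rest => if d ≥ pvDigitVal c then pvIdxA d rest + 1 else 0

def solve (digits : String) : String :=
  let l := digits.toList
  let num := l.foldl (fun n c => n + pvDigitVal c) 0
  let d := 9 - PySem.Int.mod num 9
  if d = 9 then
    String.ofList (PySem.List.slice l (some 0) (some 1) ++ '0' :: PySem.List.slice l (some 1) none)
  else
    let i := pvIdxA d l
    String.ofList (PySem.List.slice l none (some (i : Int)) ++ PySem.Int.toChars d ++
               PySem.List.slice l (some (i : Int)) none)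

-- ===== PORT B =====
def solve_alt (digits : String) : String :=
  let l := digits.toList
  let num := (l.map pvDigitVal).sum
  let e := PySem.Int.mod (9 - PySem.Int.mod num 9) 9
  if e = 0 then
    String.ofList (PySem.List.slice l (some 0) (some 1) ++ '0' :: PySem.List.slice l (some 1) none)
  else
    match PySem.List.min?
        ((PySem.List.pyRange 0 ((l.length : Int) + 1) 1).map
          (fun i => String.ofList (PySem.List.slice l none (some i) ++ PySem.Int.toChars e ++
                               PySem.List.slice l (some i) none)))
        (fun s => s) with
    | some m => m
    | none => ""   -- unreachable: range(L+1) is never empty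

-- ===== PRECONDITION & SPEC =====
-- int(digit) raises ValueError on any non-digit character, so A only returns when every character is a digit
def Pre_solve (digits : String) : Prop := digits.toList.all PySem.Chars.isdigit = true
instance (digits : String) : Decidable (Pre_solve digits) := by unfold Pre_solve; infer_instance
def pvWitness_solve : String := "1234"
def Spec_solve (digits : String) (out : String) : Prop := out = solve_alt digits
instance (digits : String) (out : String) : Decidable (Spec_solve digits out) := by unfold Spec_solve; infer_instance

-- ===== CLAIM (what is proved, stated in full; the proofs are below) =====
def Claim_equal_solve : Prop := ∀ (digits : String), Dom_solve digits → Pre_solve digits → Spec_solve digits (solve digits)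

-- ===== LEMMAS AND PROOFS =====

theorem digit_enum (c : Char) (h : PySem.Chars.isdigit c = true) :
    c ∈ ['0','1','2','3','4','5','6','7','8','9'] := by
  simp [PySem.Chars.isdigit, Char.le_def, UInt32.le_iff_toNat_le] at h
  have he : Char.ofNat c.toNat = c := Char.ofNat_toNat c
  have h0 : 48 ≤ c.toNat ∧ c.toNat ≤ 57 := by unfold Char.toNat; exact h
  obtain ⟨a, b⟩ := h0
  interval_cases hn : c.toNat <;> rw [← he] <;> decide

theorem val_le_iff (x y : Char) (hx : PySem.Chars.isdigit x = true)
    (hy : PySem.Chars.isdigit y = true) : pvDigitVal x ≤ pvDigitVal y ↔ x ≤ y := by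
  have h1 := digit_enum x hx
  have h2 := digit_enum y hy
  fin_cases h1 <;> fin_cases h2 <;> decide

-- the insertion digit as a character, and its basic facts for 1 ≤ d ≤ 8
def pvCd (d : Int) : Char := Char.ofNat (48 + d.toNat)

theorem cd_facts (d : Int) (h1 : 1 ≤ d) (h2 : d ≤ 8) :
    PySem.Int.toChars d = [pvCd d] ∧ PySem.Chars.isdigit (pvCd d) = true ∧
      pvDigitVal (pvCd d) = d := by
  interval_cases d <;> refine ⟨by decide, by decide, by decide⟩

-- all L+1 insertions of ce into l, in position order
def pvIns (ce : Char) : List Char → List (List Char)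
  | [] => [[ce]]
  | x :: xs => (ce :: x :: xs) :: (pvIns ce xs).map (x :: ·)

-- A's greedy result as a structural recursion
def pvGre (ce : Char) : List Char → List Char
  | [] => [ce]
  | x :: xs => if x ≤ ce then x :: pvGre ce xs else ce :: x :: xs

theorem ins_eq_range (ce : Char) (l : List Char) :
    (List.range (l.length + 1)).map (fun k => l.take k ++ ce :: l.drop k) = pvIns ce l := by
  induction l with
  | nil => simp [pvIns]
  | cons x xs ih =>
    rw [pvIns, ← ih]
    rw [List.range_succ_eq_map]
    simp [List.map_map, Function.comp]

theorem head_ins (ce : Char) (l : List Char) :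
    ∃ rest, pvIns ce l = (ce :: l) :: rest := by
  cases l with
  | nil => exact ⟨[], rfl⟩
  | cons x xs => exact ⟨_, rfl⟩

theorem gre_mem (ce : Char) (l : List Char) : pvGre ce l ∈ pvIns ce l := by
  induction l with
  | nil => simp [pvGre, pvIns]
  | cons x xs ih =>
    rw [pvGre, pvIns]
    by_cases h : x ≤ ce
    · simp only [if_pos h]
      exact List.mem_cons_of_mem _ (List.mem_map.mpr ⟨_, ih, rfl⟩)
    · simp [if_neg h]

theorem listle_bridge (s t : List Char) :
    @LE.le _ List.instLE s t ↔ @LE.le _ (@List.LE' Char _) s t := by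
  constructor
  · intro h
    refine le_of_not_gt (fun hc => ?_)
    exact h (show t < s from hc)
  · intro h hc
    exact absurd h (not_le_of_gt (show @LT.lt _ (@List.instLinearOrder Char _).toLT t s from hc))

theorem listlt_le (s t : List Char) (h : s < t) : @LE.le _ List.instLE s t :=
  (listle_bridge s t).mpr
    (le_of_lt (show @LT.lt _ (@List.instLinearOrder Char _).toLT s t from h))

theorem gre_min (ce : Char) (l : List Char) :
    ∀ y ∈ pvIns ce l, @LE.le _ List.instLE (pvGre ce l) y := by
  induction l with
  | nil => intro y hy; simp [pvIns] at hy; simp [hy, pvGre]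
  | cons x xs ih =>
    intro y hy
    rw [pvIns] at hy
    rcases List.mem_cons.mp hy with h0 | hm
    · subst h0
      rw [pvGre]
      by_cases h : x ≤ ce
      · rw [if_pos h]
        rcases lt_or_eq_of_le h with hlt | heq
        · exact listlt_le _ _ (List.cons_lt_cons_iff.mpr (Or.inl hlt))
        · subst heq
          obtain ⟨rest, hr⟩ := head_ins x xs
          have hx : x :: xs ∈ pvIns x xs := by rw [hr]; exact List.mem_cons_self
          exact List.cons_le_cons_iff.mpr (Or.inr ⟨rfl, ih _ hx⟩)
      · rw [if_neg h]
        exact (listle_bridge _ _).mpr le_rfl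
    · obtain ⟨z, hz, rfl⟩ := List.mem_map.mp hm
      rw [pvGre]
      by_cases h : x ≤ ce
      · rw [if_pos h]
        exact List.cons_le_cons_iff.mpr (Or.inr ⟨rfl, ih _ hz⟩)
      · rw [if_neg h]
        exact listlt_le _ _ (List.cons_lt_cons_iff.mpr (Or.inl (lt_of_not_ge h)))

-- A's index-based slice result equals the structural greedy insertion
theorem idxA_eq_gre (d : Int) (l : List Char) (hl : l.all PySem.Chars.isdigit = true)
    (h1 : 1 ≤ d) (h2 : d ≤ 8) :
    l.take (pvIdxA d l) ++ pvCd d :: l.drop (pvIdxA d l) = pvGre (pvCd d) l := by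
  obtain ⟨-, hcd, hval⟩ := cd_facts d h1 h2
  induction l with
  | nil => rfl
  | cons x xs ih =>
    simp only [List.all_cons, Bool.and_eq_true] at hl
    rw [pvIdxA, pvGre]
    by_cases h : d ≥ pvDigitVal x
    · have hx : x ≤ pvCd d := (val_le_iff x (pvCd d) hl.1 hcd).mp (by omega)
      rw [if_pos h, if_pos hx]
      simpa using ih hl.2
    · have hx : ¬ x ≤ pvCd d := fun hle =>
        h (by have := (val_le_iff x (pvCd d) hl.1 hcd).mpr hle; omega)
      rw [if_neg h, if_neg hx]
      rfl

theorem min_ins (ce : Char) (l : List Char) :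
    PySem.List.min? ((pvIns ce l).map String.ofList) (fun s => s) = some (String.ofList (pvGre ce l)) := by
  have hne : (pvIns ce l).map String.ofList ≠ [] := by
    obtain ⟨rest, hr⟩ := head_ins ce l; simp [hr]
  obtain ⟨m, hm⟩ : ∃ m, PySem.List.min? ((pvIns ce l).map String.ofList) (fun s => s) = some m := by
    cases hmin : PySem.List.min? ((pvIns ce l).map String.ofList) (fun s => s) with
    | none => exact absurd ((PySem.List.min?_eq_none_iff _ _).mp hmin) hne
    | some m => exact ⟨m, rfl⟩
  rw [hm]
  obtain ⟨y, hy, rfl⟩ := List.mem_map.mp (PySem.List.min?_mem hm)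
  have h1 : String.ofList y ≤ String.ofList (pvGre ce l) :=
    PySem.List.min?_isMin hm _ (List.mem_map.mpr ⟨_, gre_mem ce l, rfl⟩)
  have h2 : @LE.le _ (@List.LE' Char _) (pvGre ce l) y :=
    (listle_bridge _ _).mp (gre_min ce l y hy)
  have h1' : @LE.le _ (@List.LE' Char _) y (pvGre ce l) := by
    have hx := String.le_iff_toList_le.mp h1
    simpa using hx
  rw [le_antisymm h1' h2]

-- A's foldl sum equals B's map-sum
theorem foldl_eq_sum (l : List Char) (a : Int) :
    l.foldl (fun n c => n + pvDigitVal c) a = a + (l.map pvDigitVal).sum := by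
  induction l generalizing a with
  | nil => simp
  | cons x xs ih => simp [List.foldl_cons, ih (a + pvDigitVal x)]; ring

-- B's candidate list is exactly pvIns, mapped to strings
theorem cands_eq_ins (ce : Char) (l : List Char) :
    (PySem.List.pyRange 0 ((l.length : Int) + 1) 1).map
        (fun i => String.ofList (PySem.List.slice l none (some i) ++ ce ::
                             PySem.List.slice l (some i) none))
      = (pvIns ce l).map String.ofList := by
  have hc : ((l.length : Int) + 1) = ((l.length + 1 : Nat) : Int) := by push_cast; ring
  rw [hc, PySem.List.pyRange_zero_natCast, List.map_map, ← ins_eq_range ce l, List.map_map]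
  apply List.map_congr_left
  intro k _
  simp [Function.comp, PySem.List.slice_to_natCast, PySem.List.slice_from_natCast]

-- ===== VERDICT (by name: the statement is the Claim_ definition above) =====
theorem solve_spec : Claim_equal_solve := by
  intro digits _ hpre
  unfold Spec_solve solve solve_alt
  simp only []
  set l := digits.toList with hldef
  have hnum : l.foldl (fun n c => n + pvDigitVal c) 0 = (l.map pvDigitVal).sum := by
    simpa using foldl_eq_sum l 0
  rw [hnum]
  set num := (l.map pvDigitVal).sum with hnumdef
  have hr0 : 0 ≤ PySem.Int.mod num 9 := PySem.Int.mod_nonneg num (by norm_num)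
  have hr9 : PySem.Int.mod num 9 < 9 := PySem.Int.mod_lt num (by norm_num)
  set r := PySem.Int.mod num 9 with hrdef
  have hmod : PySem.Int.mod (9 - r) 9 = if 9 - r = 9 then 0 else 9 - r := by
    rw [PySem.Int.mod_eq_emod_of_pos (show (0:Int) < 9 by norm_num)]
    split_ifs with h
    · omega
    · omega
  by_cases h9 : 9 - r = 9
  · rw [if_pos h9, hmod, if_pos h9, if_pos rfl]
  · rw [if_neg h9, hmod, if_neg h9]
    have h0 : ¬ (9 - r = 0) := by omega
    rw [if_neg h0]
    have h1 : 1 ≤ 9 - r := by omega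
    have h2 : 9 - r ≤ 8 := by omega
    obtain ⟨htc, -, -⟩ := cd_facts (9 - r) h1 h2
    rw [htc]
    have hall : l.all PySem.Chars.isdigit = true := hpre
    simp only [List.append_assoc, List.singleton_append]
    rw [cands_eq_ins (pvCd (9 - r)) l, min_ins (pvCd (9 - r)) l]
    rw [PySem.List.slice_to_natCast, PySem.List.slice_from_natCast]
    rw [idxA_eq_gre (9 - r) l hall h1 h2]
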